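-- pv_equiv track=rewrite | github.com/huhlim/cg2all | cg2all/lib/residue_constants_base.py | generate_atom_alt_s
-- ===== SOURCE A (Python) =====
-- def generate_atom_alt_s(atom_s, periodic):
--     alt_s = [[] for _ in range(periodic)]
--     for atom in atom_s[:3]:
--         for i in range(periodic):
--             alt_s[i].append(atom)
--     i = 0
--     for atom in atom_s[3:]:
--         if "*" in atom:
--             atom_name = atom.replace("*", "")
--             for k in range(periodic):
--                 alt_s[k].append(atom_name)
--         else:
--             k = i % periodic
--             alt_s[k].append(atom)
--             i += 1
--     return alt_s
-- ===== SOURCE B (Python) =====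
-- def generate_atom_alt_s(atom_s, periodic):
--     head = list(atom_s[:3])
--     # one pass: annotate each tail atom with its target list (None = all lists)
--     entries = []
--     i = 0
--     for atom in atom_s[3:]:
--         if "*" in atom:
--             entries.append((atom.replace("*", ""), None))
--         else:
--             entries.append((atom, i % periodic))
--             i += 1
--     # build each list independently from the annotation table
--     return [head + [name for name, tgt in entries if tgt is None or tgt == k]
--             for k in range(periodic)]
-- ===== Notes on version B (the rewrite author's own statement) =====
-- stated objective: alternative
-- what changed: Instead of appending atoms into all periodic lists inside one stateful pass, B makes one pass over atom_s[3:] building a (name, target) annotation table (target None for starred atoms, i % periodic for plain ones) and then builds each of the periodic output lists independently from that table.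
import Mathlib
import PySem

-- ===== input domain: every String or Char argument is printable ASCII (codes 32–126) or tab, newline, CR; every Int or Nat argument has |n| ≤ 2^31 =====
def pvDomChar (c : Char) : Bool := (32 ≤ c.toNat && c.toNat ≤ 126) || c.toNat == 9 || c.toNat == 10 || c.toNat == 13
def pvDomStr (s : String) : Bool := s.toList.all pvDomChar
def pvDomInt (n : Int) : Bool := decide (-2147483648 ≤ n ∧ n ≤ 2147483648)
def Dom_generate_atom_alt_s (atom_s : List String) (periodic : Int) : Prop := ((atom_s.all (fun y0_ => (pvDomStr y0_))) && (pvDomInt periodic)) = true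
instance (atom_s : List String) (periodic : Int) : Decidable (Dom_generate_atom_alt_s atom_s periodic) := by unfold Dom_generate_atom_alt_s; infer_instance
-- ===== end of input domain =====

-- B replaces A's append-into-all-lists pass by a one-pass (name, target) annotation table
-- plus an independent per-list build; objective: alternative decomposition, same cost.

-- ===== PORT A =====
-- alt_s[k].append(atom): exact for 0 ≤ k < alt.length (Python raises outside; Pre_ excludes those runs)
def pvAppendAt (alt : List (List String)) (k : Int) (atom : String) : List (List String) :=
  alt.modify k.toNat (fun l => l ++ [atom])

def generate_atom_alt_s (atom_s : List String) (periodic : Int) : List (List String) :=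
  -- alt_s = [[] for _ in range(periodic)], then the first-3 loop, then the tail loop; returns alt_s
  ((PySem.List.slice atom_s (some 3) none).foldl
      (fun (st : List (List String) × Int) atom =>
        if PySem.Str.isIn "*" atom then
          ((PySem.List.pyRange 0 periodic 1).foldl
            (fun a k => pvAppendAt a k (PySem.Str.replace atom "*" "")) st.1, st.2)
        else
          (pvAppendAt st.1 (PySem.Int.mod st.2 periodic) atom, st.2 + 1))
      ((PySem.List.slice atom_s none (some 3)).foldl
        (fun alt atom =>
          (PySem.List.pyRange 0 periodic 1).foldl (fun a i => pvAppendAt a i atom) alt)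
        ((PySem.List.pyRange 0 periodic 1).map (fun _ => ([] : List String))), 0)).1

-- ===== PORT B =====
def generate_atom_alt_s_alt (atom_s : List String) (periodic : Int) : List (List String) :=
  -- entries = annotated tail table; each output list k = head + names targeted at ALL (none) or k
  (PySem.List.pyRange 0 periodic 1).map (fun k =>
    PySem.List.slice atom_s none (some 3) ++
      ((((PySem.List.slice atom_s (some 3) none).foldl
          (fun (st : List (String × Option Int) × Int) atom =>
            if PySem.Str.isIn "*" atom then
              (st.1 ++ [(PySem.Str.replace atom "*" "", none)], st.2)
            else
              (st.1 ++ [(atom, some (PySem.Int.mod st.2 periodic))], st.2 + 1)) ([], 0)).1).filter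
        (fun e => e.2 == none || e.2 == some k)).map Prod.fst)

-- ===== PRECONDITION & SPEC =====
-- Pre_ is exactly A's domain of normal return: for periodic ≤ 0, A raises (ZeroDivisionError or
-- IndexError) as soon as a non-starred atom occurs after the first three; it returns only when
-- every such atom is starred.
def Pre_generate_atom_alt_s (atom_s : List String) (periodic : Int) : Prop :=
  1 ≤ periodic ∨ ∀ a ∈ atom_s.drop 3, PySem.Str.isIn "*" a = true
instance (atom_s : List String) (periodic : Int) : Decidable (Pre_generate_atom_alt_s atom_s periodic) := by unfold Pre_generate_atom_alt_s; infer_instance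

def pvWitness_generate_atom_alt_s : List String × Int := (["N", "CA", "C", "O*", "HB1", "HB2"], 2)

def Spec_generate_atom_alt_s (atom_s : List String) (periodic : Int) (out : List (List String)) : Prop := out = generate_atom_alt_s_alt atom_s periodic
instance (atom_s : List String) (periodic : Int) (out : List (List String)) : Decidable (Spec_generate_atom_alt_s atom_s periodic out) := by unfold Spec_generate_atom_alt_s; infer_instance

-- ===== CLAIM (what is proved, stated in full; the proofs are below) =====
def Claim_equal_generate_atom_alt_s : Prop := ∀ (atom_s : List String) (periodic : Int), Dom_generate_atom_alt_s atom_s periodic → Pre_generate_atom_alt_s atom_s periodic → Spec_generate_atom_alt_s atom_s periodic (generate_atom_alt_s atom_s periodic)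

-- ===== LEMMAS AND PROOFS =====

-- named forms of the two loop bodies of port A and the entries body of port B (definitionally equal)
def pvStepA (periodic : Int) (st : List (List String) × Int) (atom : String) : List (List String) × Int :=
  if PySem.Str.isIn "*" atom then
    ((PySem.List.pyRange 0 periodic 1).foldl (fun a k => pvAppendAt a k (PySem.Str.replace atom "*" "")) st.1, st.2)
  else
    (pvAppendAt st.1 (PySem.Int.mod st.2 periodic) atom, st.2 + 1)

def pvStepB (periodic : Int) (st : List (String × Option Int) × Int) (atom : String) : List (String × Option Int) × Int :=
  if PySem.Str.isIn "*" atom then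
    (st.1 ++ [(PySem.Str.replace atom "*" "", none)], st.2)
  else
    (st.1 ++ [(atom, some (PySem.Int.mod st.2 periodic))], st.2 + 1)

def pvHeadStep (periodic : Int) (alt : List (List String)) (atom : String) : List (List String) :=
  (PySem.List.pyRange 0 periodic 1).foldl (fun a i => pvAppendAt a i atom) alt

-- B's annotation table as a structural recursion (what B's entries-building fold computes)
def pvAssign (periodic : Int) : List String → Int → List (String × Option Int)
  | [], _ => []
  | a :: t, i =>
    if PySem.Str.isIn "*" a then (PySem.Str.replace a "*" "", none) :: pvAssign periodic t i
    else (a, some (PySem.Int.mod i periodic)) :: pvAssign periodic t (i + 1)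

lemma pvAssign_cons (periodic : Int) (a : String) (t : List String) (i : Int) :
    pvAssign periodic (a :: t) i =
      if PySem.Str.isIn "*" a then (PySem.Str.replace a "*" "", none) :: pvAssign periodic t i
      else (a, some (PySem.Int.mod i periodic)) :: pvAssign periodic t (i + 1) := rfl

lemma pvEntries_eq (periodic : Int) (t : List String) :
    ∀ (acc : List (String × Option Int)) (i : Int),
      (t.foldl (pvStepB periodic) (acc, i)).1 = acc ++ pvAssign periodic t i := by
  induction t with
  | nil => intro acc i; simp [pvAssign]
  | cons a t ih =>
    intro acc i
    rw [List.foldl_cons, pvAssign_cons]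
    by_cases h : PySem.Str.isIn "*" a = true
    · rw [show pvStepB periodic (acc, i) a = (acc ++ [(PySem.Str.replace a "*" "", none)], i) by
        unfold pvStepB; rw [if_pos h], if_pos h, ih]
      simp
    · rw [show pvStepB periodic (acc, i) a = (acc ++ [(a, some (PySem.Int.mod i periodic))], i + 1) by
        unfold pvStepB; rw [if_neg h], if_neg h, ih]
      simp

-- appending via the range(n) loop of modifies applies f to the first n entries
lemma pvFoldModify {α : Type} (f : α → α) :
    ∀ (n : Nat) (alt : List α), n ≤ alt.length →
      (PySem.List.pyRange 0 (n : Int) 1).foldl (fun a (i : Int) => a.modify i.toNat f) alt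
      = (alt.take n).map f ++ alt.drop n := by
  intro n
  induction n with
  | zero => intro alt _; simp [PySem.List.pyRange_one_eq_nil]
  | succ n ih =>
    intro alt hlen
    have h1 : ((n + 1 : Nat) : Int) = (n : Int) + 1 := by push_cast; ring
    rw [h1, PySem.List.pyRange_one_succ_right (by positivity), List.foldl_append,
        ih alt (by omega), List.foldl_cons, List.foldl_nil]
    apply List.ext_getElem
    · simp only [List.length_modify, List.length_append, List.length_map, List.length_take,
        List.length_drop]
      omega
    · intro j hj1 hj2
      rw [List.getElem_modify]
      have hlt : ((alt.take n).map f).length = n := by simp; omega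
      simp only [Int.toNat_natCast]
      by_cases hjn : j < n
      · rw [if_neg (by omega)]
        rw [List.getElem_append_left (by omega), List.getElem_append_left (by simp; omega)]
        simp [List.getElem_take]
      · by_cases hje : j = n
        · subst hje
          rw [if_pos rfl, List.getElem_append_right (by omega), List.getElem_append_left (by simp; omega)]
          simp only [hlt, Nat.sub_self, List.getElem_drop, List.getElem_map, List.getElem_take,
            Nat.add_zero]
        · have hlt2 : ((alt.take (n + 1)).map f).length = n + 1 := by simp; omega
          rw [if_neg (by omega), List.getElem_append_right (by omega),
            List.getElem_append_right (by simp; omega)]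
          simp only [hlt, hlt2, List.getElem_drop]
          simp only [show n + (j - n) = j from by omega, show n + 1 + (j - (n + 1)) = j from by omega]

lemma pvFoldModifyAll {α : Type} (f : α → α) (alt : List α) :
    (PySem.List.pyRange 0 (alt.length : Int) 1).foldl (fun a (i : Int) => a.modify i.toNat f) alt
    = alt.map f := by
  simpa using pvFoldModify f alt.length alt le_rfl

lemma pvHeadStep_eq (periodic : Int) (n : Nat) (hp : periodic = (n : Int))
    (alt : List (List String)) (hlen : alt.length = n) (atom : String) :
    pvHeadStep periodic alt atom = alt.map (fun l => l ++ [atom]) := by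
  unfold pvHeadStep
  rw [hp, ← hlen]
  simpa [pvAppendAt] using pvFoldModifyAll (fun l => l ++ [atom]) alt

-- the picked names for list j
def pvPick (periodic : Int) (j : Nat) (t : List String) (i : Int) : List String :=
  ((pvAssign periodic t i).filter (fun e => e.2 == none || e.2 == some ((j : Nat) : Int))).map Prod.fst

lemma pvPick_cons_star (periodic : Int) (j : Nat) (a : String) (t : List String) (i : Int)
    (h : PySem.Str.isIn "*" a = true) :
    pvPick periodic j (a :: t) i = PySem.Str.replace a "*" "" :: pvPick periodic j t i := by
  unfold pvPick
  rw [pvAssign_cons, if_pos h]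
  simp

lemma pvPick_cons_plain (periodic : Int) (j : Nat) (a : String) (t : List String) (i : Int)
    (h : ¬ PySem.Str.isIn "*" a = true) :
    pvPick periodic j (a :: t) i =
      (if PySem.Int.mod i periodic = ((j : Nat) : Int) then [a] else []) ++ pvPick periodic j t (i + 1) := by
  unfold pvPick
  rw [pvAssign_cons, if_neg h]
  by_cases hm : PySem.Int.mod i periodic = ((j : Nat) : Int) <;> simp [hm]

lemma pvMainLoop (periodic : Int) (n : Nat) (hp : periodic = (n : Int)) (hn : 0 < n)
    (t : List String) :
    ∀ (alt : List (List String)) (i : Int), alt.length = n → 0 ≤ i →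
      (t.foldl (pvStepA periodic) (alt, i)).1.length = n ∧
      ∀ (j : Nat) (h1 : j < (t.foldl (pvStepA periodic) (alt, i)).1.length) (h2 : j < alt.length),
        (t.foldl (pvStepA periodic) (alt, i)).1[j] = alt[j] ++ pvPick periodic j t i := by
  induction t with
  | nil =>
    intro alt i hlen _
    exact ⟨hlen, by intro j h1 h2; simp [pvPick, pvAssign]⟩
  | cons a t ih =>
    intro alt i hlen hi
    by_cases hs : PySem.Str.isIn "*" a = true
    · -- starred: appended to every list
      have hstep : pvStepA periodic (alt, i) a = (alt.map (fun l => l ++ [PySem.Str.replace a "*" ""]), i) := by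
        unfold pvStepA
        rw [if_pos hs]
        exact congrArg (fun x => (x, i)) (pvHeadStep_eq periodic n hp alt hlen (PySem.Str.replace a "*" ""))
      rw [List.foldl_cons, hstep]
      obtain ⟨hl, he⟩ := ih (alt.map (fun l => l ++ [PySem.Str.replace a "*" ""])) i (by simp [hlen]) hi
      refine ⟨hl, ?_⟩
      intro j h1 h2
      rw [he j h1 (by simp [h2]), pvPick_cons_star periodic j a t i hs]
      simp [List.append_assoc]
    · -- plain: appended to list (i % periodic)
      have hppos : (0 : Int) < periodic := by rw [hp]; exact_mod_cast hn
      have hm0 : 0 ≤ PySem.Int.mod i periodic := PySem.Int.mod_nonneg i hppos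
      have hmlt : PySem.Int.mod i periodic < periodic := PySem.Int.mod_lt i hppos
      have hmn : (PySem.Int.mod i periodic).toNat < n := by omega
      have hstep : pvStepA periodic (alt, i) a = (pvAppendAt alt (PySem.Int.mod i periodic) a, i + 1) := by
        unfold pvStepA
        rw [if_neg hs]
      rw [List.foldl_cons, hstep]
      obtain ⟨hl, he⟩ := ih (pvAppendAt alt (PySem.Int.mod i periodic) a) (i + 1)
        (by simp [pvAppendAt, List.length_modify, hlen]) (by omega)
      refine ⟨hl, ?_⟩
      intro j h1 h2
      rw [he j h1 (by simp [pvAppendAt, List.length_modify, h2]),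
          pvPick_cons_plain periodic j a t i hs]
      unfold pvAppendAt
      rw [List.getElem_modify]
      by_cases hjm : (PySem.Int.mod i periodic).toNat = j
      · have hmj : PySem.Int.mod i periodic = ((j : Nat) : Int) := by omega
        rw [if_pos hjm, if_pos hmj]
        simp [List.append_assoc]
      · have hmj : ¬ (PySem.Int.mod i periodic = ((j : Nat) : Int)) := by omega
        rw [if_neg hjm, if_neg hmj]
        simp

-- the first loop: the first three atoms go to every list
lemma pvHeadLoop (periodic : Int) (n : Nat) (hp : periodic = (n : Int)) (hs : List String) :
    ∀ (alt : List (List String)), alt.length = n →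
      (hs.foldl (pvHeadStep periodic) alt).length = n ∧
      ∀ (j : Nat) (h1 : j < (hs.foldl (pvHeadStep periodic) alt).length) (h2 : j < alt.length),
        (hs.foldl (pvHeadStep periodic) alt)[j] = alt[j] ++ hs := by
  induction hs with
  | nil => intro alt hlen; exact ⟨hlen, by intro j h1 h2; simp⟩
  | cons a hs ih =>
    intro alt hlen
    rw [List.foldl_cons, pvHeadStep_eq periodic n hp alt hlen a]
    obtain ⟨hl, he⟩ := ih (alt.map (fun l => l ++ [a])) (by simp [hlen])
    refine ⟨hl, ?_⟩
    intro j h1 h2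
    rw [he j h1 (by simp [h2])]
    simp [List.append_assoc]

lemma pvFoldConst {α β : Type} : ∀ (l : List α) (x : β), l.foldl (fun a _ => a) x = x := by
  intro l
  induction l with
  | nil => intro x; rfl
  | cons a t ih => intro x; rw [List.foldl_cons]; exact ih x

-- the degenerate case periodic ≤ 0 with an all-starred tail: the state stays ([], i)
lemma pvAllStar (periodic : Int) (hpz : periodic ≤ 0) (t : List String)
    (hall : ∀ a ∈ t, PySem.Str.isIn "*" a = true) :
    ∀ (i : Int), (t.foldl (pvStepA periodic) (([] : List (List String)), i)).1 = [] := by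
  induction t with
  | nil => intro i; simp
  | cons a t ih =>
    intro i
    have ha := hall a (by simp)
    have hstep : pvStepA periodic (([] : List (List String)), i) a = ([], i) := by
      unfold pvStepA
      rw [if_pos ha, PySem.List.pyRange_one_eq_nil hpz, List.foldl_nil]
    rw [List.foldl_cons, hstep]
    exact ih (fun a h => hall a (by simp [h])) i

-- ===== VERDICT (by name: the statement is the Claim_ definition above) =====
theorem generate_atom_alt_s_spec : Claim_equal_generate_atom_alt_s := by
  intro atom_s periodic _ hpre
  unfold Spec_generate_atom_alt_s generate_atom_alt_s generate_atom_alt_s_alt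
  rw [show (fun (st : List (List String) × Int) atom =>
        if PySem.Str.isIn "*" atom then
          ((PySem.List.pyRange 0 periodic 1).foldl
            (fun a k => pvAppendAt a k (PySem.Str.replace atom "*" "")) st.1, st.2)
        else
          (pvAppendAt st.1 (PySem.Int.mod st.2 periodic) atom, st.2 + 1)) = pvStepA periodic from rfl,
      show (fun (alt : List (List String)) atom =>
        (PySem.List.pyRange 0 periodic 1).foldl (fun a i => pvAppendAt a i atom) alt)
        = pvHeadStep periodic from rfl,
      show (fun (st : List (String × Option Int) × Int) atom =>
        if PySem.Str.isIn "*" atom then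
          (st.1 ++ [(PySem.Str.replace atom "*" "", none)], st.2)
        else
          (st.1 ++ [(atom, some (PySem.Int.mod st.2 periodic))], st.2 + 1)) = pvStepB periodic from rfl,
      pvEntries_eq]
  by_cases hp1 : 1 ≤ periodic
  · -- periodic ≥ 1
    have hp : periodic = (periodic.toNat : Int) := by omega
    have hn0 : 0 < periodic.toNat := by omega
    have hlen0 : ((PySem.List.pyRange 0 periodic 1).map (fun _ => ([] : List String))).length
        = periodic.toNat := by
      rw [List.length_map, PySem.List.length_pyRange_one]
      omega
    obtain ⟨hl1, he1⟩ := pvHeadLoop periodic periodic.toNat hp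
      (PySem.List.slice atom_s none (some 3)) _ hlen0
    obtain ⟨hl2, he2⟩ := pvMainLoop periodic periodic.toNat hp hn0
      (PySem.List.slice atom_s (some 3) none) _ 0 hl1 le_rfl
    apply List.ext_getElem
    · rw [hl2, List.length_map, PySem.List.length_pyRange_one]
      omega
    · intro j hj1 hj2
      have hjn : j < periodic.toNat := by rwa [hl2] at hj1
      rw [he2 j hj1 (by omega), he1 j (by omega) (by omega)]
      simp only [List.getElem_map, PySem.List.getElem_pyRange_one, List.nil_append, zero_add,
        List.append_assoc]
      rfl
  · -- periodic ≤ 0: Pre_ forces an all-starred tail; both sides are []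
    have hpz : periodic ≤ 0 := by omega
    have hall : ∀ a ∈ atom_s.drop 3, PySem.Str.isIn "*" a = true := by
      rcases hpre with h | h
      · omega
      · exact h
    have hsl : PySem.List.slice atom_s (some 3) none = atom_s.drop 3 := by
      simpa using PySem.List.slice_from_natCast atom_s 3
    have hr : PySem.List.pyRange 0 periodic 1 = [] := PySem.List.pyRange_one_eq_nil hpz
    have hhead : (PySem.List.slice atom_s none (some 3)).foldl (pvHeadStep periodic)
        ((PySem.List.pyRange 0 periodic 1).map (fun _ => ([] : List String))) = [] := by
      rw [hr, List.map_nil,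
        show pvHeadStep periodic = (fun (a : List (List String)) (_ : String) => a) from
          funext fun a => funext fun atom => by unfold pvHeadStep; rw [hr, List.foldl_nil],
        pvFoldConst]
    rw [hhead, hsl, pvAllStar periodic hpz (atom_s.drop 3) hall 0, hr, List.map_nil]
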